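-- pv_equiv track=rewrite | github.com/jsolemd/SoleMD.Graph | engine/app/rag/_query_enrichment_phrases.py | normalize_title_key
-- ===== SOURCE A (Python) =====
-- import unicodedata
--
-- def normalize_title_key(text: str | None) -> str:
--     """Normalize a title-like string into a stable lexical comparison key.
--
--     Keep this aligned with the PostgreSQL helper `solemd.normalize_title_key`
--     used by the runtime retrieval indexes and exact-title search path.
--     """
--
--     normalized = unicodedata.normalize("NFKC", text or "")
--     tokens: list[str] = []
--     current: list[str] = []
--     for char in normalized.casefold():
--         if char.isalnum():
--             current.append(char)
--             continue
--         if current: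
--             tokens.append("".join(current))
--             current = []
--     if current:
--         tokens.append("".join(current))
--     return " ".join(tokens)
-- ===== SOURCE B (Python) =====
-- import unicodedata
--
-- def normalize_title_key(text):
--     """Normalize a title-like string into a stable lexical comparison key.
--
--     Same result as A: map every non-alphanumeric character of the NFKC-normalized,
--     casefolded text to a space, then let no-arg str.split() do the tokenization.
--     """
--     normalized = unicodedata.normalize("NFKC", text or "")
--     cleaned = "".join(c if c.isalnum() else " " for c in normalized.casefold())
--     return " ".join(cleaned.split())
-- ===== Notes on version B (the rewrite author's own statement) =====
-- stated objective: idiomatic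
-- what changed: Replaces A's manual token-buffer state machine (current list, flush-on-delimiter) with a character map to spaces followed by no-arg str.split(), delegating tokenization to the standard library.
import Mathlib
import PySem

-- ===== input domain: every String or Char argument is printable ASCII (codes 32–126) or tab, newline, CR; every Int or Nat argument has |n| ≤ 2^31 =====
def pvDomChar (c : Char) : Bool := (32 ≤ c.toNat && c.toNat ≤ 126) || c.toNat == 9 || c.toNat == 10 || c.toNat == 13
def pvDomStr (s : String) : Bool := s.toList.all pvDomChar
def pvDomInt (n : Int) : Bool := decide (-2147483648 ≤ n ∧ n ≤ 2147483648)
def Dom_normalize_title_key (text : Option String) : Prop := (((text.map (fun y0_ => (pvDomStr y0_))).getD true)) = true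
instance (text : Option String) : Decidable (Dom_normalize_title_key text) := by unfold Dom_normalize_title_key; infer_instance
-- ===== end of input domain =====

-- B replaces A's manual token-buffer state machine with a char-to-space map followed by
-- no-arg split() (idiomatic decomposition; same cost). On the ASCII domain
-- unicodedata.normalize("NFKC", ·) is the identity and str.casefold is str.lower:
-- both ports render that step as PySem.Chars.lower (exact on ASCII).

-- ===== PORT A =====
-- one step of A's for-loop: state = (tokens so far, current buffer)
def nk_step (st : List (List Char) × List Char) (c : Char) : List (List Char) × List Char :=
  if PySem.Chars.isalnum c then (st.1, st.2 ++ [c])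
  else if st.2.isEmpty then st else (st.1 ++ [st.2], [])

def normalize_title_key (text : Option String) : String :=
  let normalized := (text.getD "").toList
  let st := (PySem.Chars.lower normalized).foldl nk_step ([], [])
  let tokens := if st.2.isEmpty then st.1 else st.1 ++ [st.2]
  String.ofList (PySem.Chars.join [' '] tokens)

-- ===== PORT B =====
def normalize_title_key_alt (text : Option String) : String :=
  let normalized := (text.getD "").toList
  let cleaned := (PySem.Chars.lower normalized).map
    (fun c => if PySem.Chars.isalnum c then c else ' ')
  String.ofList (PySem.Chars.join [' '] (PySem.Chars.split₀ cleaned))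

-- ===== PRECONDITION & SPEC =====
def Spec_normalize_title_key (text : Option String) (out : String) : Prop := out = normalize_title_key_alt text
instance (text : Option String) (out : String) : Decidable (Spec_normalize_title_key text out) := by unfold Spec_normalize_title_key; infer_instance

-- ===== CLAIM (what is proved, stated in full; the proofs are below) =====
def Claim_equal_normalize_title_key : Prop := ∀ (text : Option String), Dom_normalize_title_key text → Spec_normalize_title_key text (normalize_title_key text)

-- ===== LEMMAS AND PROOFS =====

theorem char_le_iff (a b : Char) : a ≤ b ↔ a.toNat ≤ b.toNat := Iff.rfl

-- an alphanumeric character is never whitespace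
theorem alnum_not_space (c : Char) (h : PySem.Chars.isalnum c = true) :
    PySem.Chars.isspace c = false := by
  simp [PySem.Chars.isalnum, PySem.Chars.isalpha, PySem.Chars.isupper, PySem.Chars.islower,
    PySem.Chars.isdigit, PySem.Chars.isspace, char_le_iff] at h ⊢
  omega

-- split₀'s worker on the space-cleaned string computes exactly A's state machine
theorem split_go_eq_fold (cs : List Char) :
    ∀ (tokens : List (List Char)) (cur : List Char),
    PySem.Chars.split₀.go (cs.map (fun c => if PySem.Chars.isalnum c then c else ' '))
        cur.reverse tokens.reverse
      = (let st := cs.foldl nk_step (tokens, cur);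
         if st.2.isEmpty then st.1 else st.1 ++ [st.2]) := by
  induction cs with
  | nil =>
    intro tokens cur
    by_cases hc : cur.isEmpty <;>
      simp [PySem.Chars.split₀.go, hc, List.foldl]
  | cons c rest ih =>
    intro tokens cur
    by_cases ha : PySem.Chars.isalnum c
    · have hs := alnum_not_space c ha
      have hrev : (cur ++ [c]).reverse = c :: cur.reverse := by simp
      simp only [List.map_cons, if_pos ha, PySem.Chars.split₀.go, hs, Bool.false_eq_true,
        if_false, List.foldl_cons, nk_step]
      rw [← hrev, ih tokens (cur ++ [c])]
    · have hsp : PySem.Chars.isspace ' ' = true := by decide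
      by_cases hc : cur.isEmpty
      · have hcur : cur = [] := by cases cur <;> simp_all
        subst hcur
        simp only [List.map_cons, PySem.Chars.split₀.go, hsp, List.reverse_nil,
          List.isEmpty_nil, if_true, List.foldl_cons, nk_step, ha, Bool.false_eq_true, if_false]
        simpa using ih tokens []
      · have h1 : (tokens ++ [cur]).reverse = cur.reverse.reverse :: tokens.reverse := by simp
        simp only [List.map_cons, PySem.Chars.split₀.go, hsp,
          List.isEmpty_reverse, hc, Bool.false_eq_true, if_false, if_true,
          List.foldl_cons, nk_step, ha]
        rw [show ([] : List Char) = ([] : List Char).reverse from rfl, ← h1,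
          ih (tokens ++ [cur]) []]
        simp

-- ===== VERDICT (by name: the statement is the Claim_ definition above) =====
theorem normalize_title_key_spec : Claim_equal_normalize_title_key := by
  intro text _
  unfold Spec_normalize_title_key normalize_title_key normalize_title_key_alt
  have h := split_go_eq_fold (PySem.Chars.lower (text.getD "").toList) [] []
  simp only [List.reverse_nil] at h
  simp only [PySem.Chars.split₀, h]
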